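-- pv_equiv track=rewrite | github.com/bon24/codingpractice | 프로그래머스/0/120891. 369게임/369게임.py | solution
-- ===== SOURCE A (Python) =====
-- def solution(order):
--     num=["3","6","9"]
--     answer = 0
--     order=list(str(order))
--     for i in order:
--         if i in num:
--             answer+=1
--     return answer
-- ===== SOURCE B (Python) =====
-- def solution(order):
--     n = abs(order)
--     answer = 0
--     while n > 0:
--         if n % 10 in (3, 6, 9):
--             answer += 1
--         n //= 10
--     return answer
-- ===== Notes on version B (the rewrite author's own statement) =====
-- stated objective: alternative
-- what changed: B extracts decimal digits arithmetically with a while loop (n % 10, n //= 10) instead of converting the number to a string and scanning its characters.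
import Mathlib
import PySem

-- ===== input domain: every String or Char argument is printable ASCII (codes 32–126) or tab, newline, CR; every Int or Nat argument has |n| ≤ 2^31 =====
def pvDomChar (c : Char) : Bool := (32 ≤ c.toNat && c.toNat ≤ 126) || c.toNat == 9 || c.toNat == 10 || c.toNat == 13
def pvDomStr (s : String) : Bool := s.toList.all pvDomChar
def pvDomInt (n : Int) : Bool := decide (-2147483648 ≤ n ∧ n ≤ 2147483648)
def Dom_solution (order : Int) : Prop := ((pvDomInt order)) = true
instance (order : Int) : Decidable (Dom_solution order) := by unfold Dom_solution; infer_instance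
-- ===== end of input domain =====

-- B replaces A's string scan by arithmetic digit extraction (n % 10, n //= 10); same cost, no string conversion.

-- ===== PORT A =====
def solution (order : Int) : Int :=
  (PySem.Int.toStr order).toList.foldl
    (fun answer i => if i ∈ ['3', '6', '9'] then answer + 1 else answer) 0

-- ===== PORT B =====
def solution_altGo (n : Nat) (answer : Int) : Int :=
  if n = 0 then answer
  else solution_altGo (n / 10)
    (if n % 10 ∈ [3, 6, 9] then answer + 1 else answer)
decreasing_by exact Nat.div_lt_self (Nat.pos_of_ne_zero (by assumption)) (by norm_num)

def solution_alt (order : Int) : Int := solution_altGo order.natAbs 0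

-- ===== PRECONDITION & SPEC =====
def Spec_solution (order : Int) (out : Int) : Prop := out = solution_alt order
instance (order : Int) (out : Int) : Decidable (Spec_solution order out) := by unfold Spec_solution; infer_instance

-- ===== CLAIM (what is proved, stated in full; the proofs are below) =====
def Claim_equal_solution : Prop := ∀ (order : Int), Dom_solution order → Spec_solution order (solution order)

-- ===== LEMMAS AND PROOFS =====

-- the character predicate A tests, as a Bool
def pvP (c : Char) : Bool := decide (c ∈ ['3', '6', '9'])

-- digit-count of n, the value B's loop accumulates
def pvDcount (n : Nat) : Int :=
  if n = 0 then 0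
  else (if n % 10 ∈ [3, 6, 9] then (1 : Int) else 0) + pvDcount (n / 10)
decreasing_by exact Nat.div_lt_self (Nat.pos_of_ne_zero (by assumption)) (by norm_num)

theorem pvP_digitChar (d : Nat) (hd : d < 10) :
    pvP (Nat.digitChar d) = decide (d ∈ [3, 6, 9]) := by
  interval_cases d <;> decide

theorem pv_foldl_countP (xs : List Char) (acc : Int) :
    xs.foldl (fun answer i => if i ∈ ['3', '6', '9'] then answer + 1 else answer) acc
      = acc + (xs.countP pvP : Int) := by
  induction xs generalizing acc with
  | nil => simp
  | cons c cs ih =>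
    simp only [List.foldl_cons, List.countP_cons, ih, pvP]
    by_cases h : c ∈ ['3', '6', '9']
    · simp [h]; ring
    · simp [h]

theorem pv_core_count (fuel : Nat) :
    ∀ (n : Nat) (ds : List Char), n < fuel →
      ((Nat.toDigitsCore 10 fuel n ds).countP pvP : Int)
        = pvDcount n + (ds.countP pvP : Int) := by
  induction fuel with
  | zero => intro n ds h; omega
  | succ fuel ih =>
    intro n ds h
    rw [Nat.toDigitsCore]
    have hmod : n % 10 < 10 := Nat.mod_lt _ (by norm_num)
    by_cases h10 : n / 10 = 0
    · simp only [h10, if_true]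
      rw [List.countP_cons, pvP_digitChar _ hmod]
      rcases Nat.eq_zero_or_pos n with hn | hn
      · subst hn; simp [pvDcount]
      · conv_rhs => rw [pvDcount, if_neg (by omega : ¬ n = 0)]
        rw [h10]
        by_cases hm : n % 10 ∈ [3, 6, 9]
        · simp [hm, pvDcount]; ring
        · simp [hm, pvDcount]
    · simp only [h10, if_false]
      have hn : n ≠ 0 := by
        intro hn; subst hn; simp at h10
      have hlt : n / 10 < fuel := by
        have := Nat.div_lt_self (Nat.pos_of_ne_zero hn) (show 1 < 10 by norm_num)
        omega
      rw [ih (n / 10) _ hlt, List.countP_cons, pvP_digitChar _ hmod]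
      conv_rhs => rw [pvDcount, if_neg hn]
      by_cases hm : n % 10 ∈ [3, 6, 9]
      · simp [hm]; ring
      · simp [hm]

theorem pv_go_eq (n : Nat) : ∀ acc, solution_altGo n acc = acc + pvDcount n := by
  induction n using Nat.strong_induction_on with
  | _ n ih =>
    intro acc
    rw [solution_altGo, pvDcount]
    by_cases hn : n = 0
    · simp [hn]
    · rw [if_neg hn, if_neg hn,
        ih (n / 10) (Nat.div_lt_self (Nat.pos_of_ne_zero hn) (by norm_num))]
      split_ifs with hm <;> ring

theorem pv_digits_count (m : Nat) :
    ((Nat.toDigits 10 m).countP pvP : Int) = pvDcount m := by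
  rw [Nat.toDigits, pv_core_count (m + 1) m [] (by omega)]
  simp

-- ===== VERDICT (by name: the statement is the Claim_ definition above) =====
theorem solution_spec : Claim_equal_solution := by
  intro order _
  unfold Spec_solution solution solution_alt
  rw [PySem.Int.toList_toStr, pv_go_eq, pv_foldl_countP]
  unfold PySem.Int.toChars
  by_cases hneg : order < 0
  · rw [if_pos hneg, List.countP_cons]
    have : pvP '-' = false := by decide
    rw [this]
    simp [pv_digits_count]
  · rw [if_neg hneg]
    have : order.toNat = order.natAbs := by omega
    rw [this, pv_digits_count]
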